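-- pv_equiv track=rewrite | github.com/geohot/asm2464pd-firmware | compare/analyze.py | disasm_8051
-- ===== SOURCE A (Python) =====
-- def disasm_8051(data, addr, count=10):
--     """Basic 8051 disassembly (for reference only)."""
--     # Simple opcode table for common instructions
--     opcodes = {
--         0x00: ("nop", 1),
--         0x02: ("ljmp", 3),
--         0x12: ("lcall", 3),
--         0x22: ("ret", 1),
--         0x32: ("reti", 1),
--         0x74: ("mov a,#", 2),
--         0x75: ("mov direct,#", 3),
--         0x78: ("mov r0,#", 2),
--         0x79: ("mov r1,#", 2),
--         0x7a: ("mov r2,#", 2),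
--         0x7b: ("mov r3,#", 2),
--         0x7c: ("mov r4,#", 2),
--         0x7d: ("mov r5,#", 2),
--         0x7e: ("mov r6,#", 2),
--         0x7f: ("mov r7,#", 2),
--         0x80: ("sjmp", 2),
--         0x90: ("mov dptr,#", 3),
--         0xe0: ("movx a,@dptr", 1),
--         0xe4: ("clr a", 1),
--         0xf0: ("movx @dptr,a", 1),
--     }
--
--     lines = []
--     offset = 0
--     for _ in range(count):
--         if addr + offset >= len(data):
--             break
--         op = data[addr + offset]
--         if op in opcodes:
--             mnem, size = opcodes[op]
--             if size == 1:
--                 lines.append(f"{addr+offset:04x}: {op:02x}          {mnem}")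
--             elif size == 2:
--                 b1 = data[addr + offset + 1] if addr + offset + 1 < len(data) else 0
--                 lines.append(f"{addr+offset:04x}: {op:02x} {b1:02x}       {mnem}{b1:02x}")
--             elif size == 3:
--                 b1 = data[addr + offset + 1] if addr + offset + 1 < len(data) else 0
--                 b2 = data[addr + offset + 2] if addr + offset + 2 < len(data) else 0
--                 val = (b1 << 8) | b2
--                 lines.append(f"{addr+offset:04x}: {op:02x} {b1:02x} {b2:02x}    {mnem}{val:04x}")
--             offset += size
--         else:
--             lines.append(f"{addr+offset:04x}: {op:02x}          db {op:02x}h")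
--             offset += 1
--     return lines
-- ===== SOURCE B (Python) =====
-- def disasm_8051(data, addr, count=10):
--     """Basic 8051 disassembly (for reference only)."""
--     opcodes = {
--         0x00: ("nop", 1),
--         0x02: ("ljmp", 3),
--         0x12: ("lcall", 3),
--         0x22: ("ret", 1),
--         0x32: ("reti", 1),
--         0x74: ("mov a,#", 2),
--         0x75: ("mov direct,#", 3),
--         0x78: ("mov r0,#", 2),
--         0x79: ("mov r1,#", 2),
--         0x7a: ("mov r2,#", 2),
--         0x7b: ("mov r3,#", 2),
--         0x7c: ("mov r4,#", 2),
--         0x7d: ("mov r5,#", 2),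
--         0x7e: ("mov r6,#", 2),
--         0x7f: ("mov r7,#", 2),
--         0x80: ("sjmp", 2),
--         0x90: ("mov dptr,#", 3),
--         0xe0: ("movx a,@dptr", 1),
--         0xe4: ("clr a", 1),
--         0xf0: ("movx @dptr,a", 1),
--     }
--
--     # Stage 1: decode pass.  Walk the byte stream once, recording one
--     # (pos, op, mnem-or-None, size) instruction record per line; no formatting
--     # happens here.  Unknown opcodes become mnem=None records of size 1.
--     recs = []
--     pos = addr
--     while len(recs) < count and pos < len(data):
--         op = data[pos]
--         mnem, size = opcodes.get(op, (None, 1))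
--         recs.append((pos, op, mnem, size))
--         pos += size
--
--     # Stage 2: rendering pass.  Each record is formatted independently of the
--     # others: operand bytes are re-read from data (0 past the end), the hex
--     # column is the joined bytes plus a size-derived pad, and the mnemonic
--     # gains the packed operand value when size > 1.
--     def fmt(rec):
--         pos, op, mnem, size = rec
--         bs = [op] + [data[pos + k] if pos + k < len(data) else 0
--                      for k in range(1, size)]
--         col = " ".join("%02x" % b for b in bs) + " " * (13 - 3 * size)
--         if mnem is None:
--             text = "db %02xh" % op
--         elif size == 1:
--             text = mnem
--         else:
--             val = 0
--             for b in bs[1:]: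
--                 val = (val << 8) | b
--             text = mnem + "%0*x" % (2 * (size - 1), val)
--         return "%04x: %s%s" % (pos, col, text)
--
--     return [fmt(r) for r in recs]
-- ===== Notes on version B (the rewrite author's own statement) =====
-- stated objective: alternative
-- what changed: A's single fused loop that decodes and formats in one branch-per-size body is replaced by a two-stage pipeline: a decode pass walks the stream once building a list of (pos, op, mnem-or-None, size) instruction records (unknown opcodes become mnem=None size-1 records), and a separate rendering pass maps each record independently to its line through one uniform formatter (joined hex bytes plus size-derived pad, operand value folded and appended when size > 1).
import Mathlib
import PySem

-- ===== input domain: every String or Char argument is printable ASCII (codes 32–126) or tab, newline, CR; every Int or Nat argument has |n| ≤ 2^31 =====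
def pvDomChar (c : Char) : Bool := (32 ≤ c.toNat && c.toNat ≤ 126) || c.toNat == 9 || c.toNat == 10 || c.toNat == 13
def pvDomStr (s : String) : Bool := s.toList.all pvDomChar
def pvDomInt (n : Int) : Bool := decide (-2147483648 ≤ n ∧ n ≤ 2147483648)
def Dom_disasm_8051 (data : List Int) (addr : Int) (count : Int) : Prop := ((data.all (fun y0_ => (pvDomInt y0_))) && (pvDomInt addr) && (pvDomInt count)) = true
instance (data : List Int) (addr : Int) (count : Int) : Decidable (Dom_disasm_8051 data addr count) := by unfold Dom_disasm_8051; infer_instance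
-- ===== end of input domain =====

-- B replaces A's single fused decode-and-format loop (one branch per size) by a two-stage
-- pipeline: a decode pass producing instruction records, then a rendering pass mapping each
-- record to its line through one uniform formatter; objective: alternative.

-- shared primitive: Python's "%0*x" / f"{n:0wx}" — lowercase hex, '-' in front for
-- negatives, zero-padded (after the sign) to total width w; exact for every Int.
def pyHex (n : Int) (w : Int) : List Char :=
  PySem.Chars.zfill (if n < 0 then '-' :: Nat.toDigits 16 n.natAbs else Nat.toDigits 16 n.toNat) w

-- the opcode table, shared verbatim by both Pythons (mnemonic as char list, size)
def pvOpcodes : PySem.Dict Int (List Char × Int) := PySem.Dict.ofList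
  [ (0x00, ("nop".toList, 1)), (0x02, ("ljmp".toList, 3)), (0x12, ("lcall".toList, 3)),
    (0x22, ("ret".toList, 1)), (0x32, ("reti".toList, 1)), (0x74, ("mov a,#".toList, 2)),
    (0x75, ("mov direct,#".toList, 3)), (0x78, ("mov r0,#".toList, 2)), (0x79, ("mov r1,#".toList, 2)),
    (0x7a, ("mov r2,#".toList, 2)), (0x7b, ("mov r3,#".toList, 2)), (0x7c, ("mov r4,#".toList, 2)),
    (0x7d, ("mov r5,#".toList, 2)), (0x7e, ("mov r6,#".toList, 2)), (0x7f, ("mov r7,#".toList, 2)),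
    (0x80, ("sjmp".toList, 2)), (0x90, ("mov dptr,#".toList, 3)), (0xe0, ("movx a,@dptr".toList, 1)),
    (0xe4, ("clr a".toList, 1)), (0xf0, ("movx @dptr,a".toList, 1)) ]

-- ===== PORT A =====
-- A's loop body, branch for branch: three explicit size cases, else the db line
-- (string pieces written as char lists; the f-string literals are spelled out).
def pvLoopA (data : List Int) (addr : Int) : Nat → Int → List String → List String
  | 0, _, lines => lines
  | n + 1, offset, lines =>
    if (data.length : Int) ≤ addr + offset then lines
    else
      let op := PySem.List.pyGetD data (addr + offset) 0
      match PySem.Dict.get? pvOpcodes op with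
      | some (mnem, size) =>
        let lines' :=
          if size = 1 then
            lines ++ [String.ofList (pyHex (addr + offset) 4 ++ [':', ' '] ++ pyHex op 2 ++
              [' ', ' ', ' ', ' ', ' ', ' ', ' ', ' ', ' ', ' '] ++ mnem)]
          else if size = 2 then
            let b1 := if addr + offset + 1 < (data.length : Int) then PySem.List.pyGetD data (addr + offset + 1) 0 else 0
            lines ++ [String.ofList (pyHex (addr + offset) 4 ++ [':', ' '] ++ pyHex op 2 ++
              [' '] ++ pyHex b1 2 ++ [' ', ' ', ' ', ' ', ' ', ' ', ' '] ++ mnem ++ pyHex b1 2)]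
          else if size = 3 then
            let b1 := if addr + offset + 1 < (data.length : Int) then PySem.List.pyGetD data (addr + offset + 1) 0 else 0
            let b2 := if addr + offset + 2 < (data.length : Int) then PySem.List.pyGetD data (addr + offset + 2) 0 else 0
            let val := PySem.Int.bor (b1 <<< (8 : Nat)) b2
            lines ++ [String.ofList (pyHex (addr + offset) 4 ++ [':', ' '] ++ pyHex op 2 ++
              [' '] ++ pyHex b1 2 ++ [' '] ++ pyHex b2 2 ++ [' ', ' ', ' ', ' '] ++ mnem ++ pyHex val 4)]
          else lines
        pvLoopA data addr n (offset + size) lines'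
      | none =>
        pvLoopA data addr n (offset + 1)
          (lines ++ [String.ofList (pyHex (addr + offset) 4 ++ [':', ' '] ++ pyHex op 2 ++
            [' ', ' ', ' ', ' ', ' ', ' ', ' ', ' ', ' ', ' ', 'd', 'b', ' '] ++ pyHex op 2 ++ ['h'])])

def disasm_8051 (data : List Int) (addr : Int) (count : Int) : List String :=
  pvLoopA data addr count.toNat 0 []

-- ===== PORT B =====
-- B stage 1: the decode pass — 'while len(recs) < count and pos < len(data)', one
-- (pos, op, mnem-or-none, size) record appended per iteration (fuel = count - len(recs)).
def pvDecodeB (data : List Int) : Nat → Int → List (Int × Int × Option (List Char) × Int) →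
    List (Int × Int × Option (List Char) × Int)
  | 0, _, recs => recs
  | n + 1, pos, recs =>
    if (data.length : Int) ≤ pos then recs
    else
      let op := PySem.List.pyGetD data pos 0
      let ms := match PySem.Dict.get? pvOpcodes op with
        | none => (none, (1 : Int))
        | some (m, s) => (some m, s)
      pvDecodeB data n (pos + ms.2) (recs ++ [(pos, op, ms.1, ms.2)])

-- B stage 2: the uniform formatter 'fmt' applied to one record.
def pvFmtB (data : List Int) (rec : Int × Int × Option (List Char) × Int) : String :=
  let pos := rec.1
  let op := rec.2.1
  let mnem := rec.2.2.1
  let size := rec.2.2.2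
  let bs := op :: (PySem.List.pyRange 1 size 1).map
    (fun k => if pos + k < (data.length : Int) then PySem.List.pyGetD data (pos + k) 0 else 0)
  let col := PySem.Chars.join [' '] (bs.map (fun b => pyHex b 2)) ++
    List.replicate (Int.toNat (13 - 3 * size)) ' '
  let text := match mnem with
    | none => ['d', 'b', ' '] ++ pyHex op 2 ++ ['h']
    | some m =>
      if size = 1 then m
      else
        let val := bs.tail.foldl (fun v b => PySem.Int.bor (v <<< (8 : Nat)) b) 0
        m ++ pyHex val (2 * (size - 1))
  String.ofList (pyHex pos 4 ++ [':', ' '] ++ col ++ text)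

def disasm_8051_alt (data : List Int) (addr : Int) (count : Int) : List String :=
  (pvDecodeB data count.toNat addr []).map (pvFmtB data)

-- ===== PRECONDITION & SPEC =====
-- Pre_ excludes exactly the inputs on which the Python raises IndexError (a start address
-- below -len(data), hit on the first iteration); B raises there too.
def Pre_disasm_8051 (data : List Int) (addr : Int) (count : Int) : Prop :=
  count < 1 ∨ -(data.length : Int) ≤ addr
instance (data : List Int) (addr : Int) (count : Int) : Decidable (Pre_disasm_8051 data addr count) := by unfold Pre_disasm_8051; infer_instance

def pvWitness_disasm_8051 : List Int × Int × Int := ([0x74, 5, 0x02, 1, 2, 0x99], 0, 10)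

def Spec_disasm_8051 (data : List Int) (addr : Int) (count : Int) (out : List String) : Prop := out = disasm_8051_alt data addr count
instance (data : List Int) (addr : Int) (count : Int) (out : List String) : Decidable (Spec_disasm_8051 data addr count out) := by unfold Spec_disasm_8051; infer_instance

-- ===== CLAIM (what is proved, stated in full; the proofs are below) =====
def Claim_equal_disasm_8051 : Prop := ∀ (data : List Int) (addr : Int) (count : Int), Dom_disasm_8051 data addr count → Pre_disasm_8051 data addr count → Spec_disasm_8051 data addr count (disasm_8051 data addr count)

-- ===== LEMMAS AND PROOFS =====

-- every table entry has size 1, 2 or 3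
lemma pvOpcodes_size {op : Int} {mnem : List Char} {size : Int}
    (h : PySem.Dict.get? pvOpcodes op = some (mnem, size)) : size = 1 ∨ size = 2 ∨ size = 3 := by
  have hm := PySem.Dict.mem_items_of_get?_eq_some pvOpcodes h
  have hall : ∀ p ∈ pvOpcodes.items, p.2.2 = 1 ∨ p.2.2 = 2 ∨ p.2.2 = 3 := by decide
  exact hall _ hm

lemma pvZeroBor (b : Int) : PySem.Int.bor 0 b = b := by
  rw [PySem.Int.bor_comm, PySem.Int.bor_zero]

-- the decode pass's accumulator only collects output: it can be pulled out front
lemma pvDecodeB_acc (data : List Int) :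
    ∀ (n : Nat) (pos : Int) (recs : List (Int × Int × Option (List Char) × Int)),
      pvDecodeB data n pos recs = recs ++ pvDecodeB data n pos [] := by
  intro n
  induction n with
  | zero => intro pos recs; simp [pvDecodeB]
  | succ n ih =>
    intro pos recs
    simp only [pvDecodeB]
    by_cases h : (data.length : Int) ≤ pos
    · simp [h]
    · simp only [if_neg h]
      rw [ih _ (recs ++ _), ih _ ([] ++ _)]
      simp

-- the main invariant: A's fused loop = decode-then-render
lemma pvDecodeB_one (data : List Int) (n : Nat) (pos : Int)
    (r : Int × Int × Option (List Char) × Int) :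
    pvDecodeB data n pos [r] = r :: pvDecodeB data n pos [] := by
  rw [pvDecodeB_acc]; rfl

lemma pvLoop_eq (data : List Int) (addr : Int) :
    ∀ (n : Nat) (offset : Int) (lines : List String),
      pvLoopA data addr n offset lines =
        lines ++ (pvDecodeB data n (addr + offset) []).map (pvFmtB data) := by
  intro n
  induction n with
  | zero => intro offset lines; simp [pvLoopA, pvDecodeB]
  | succ n ih =>
    intro offset lines
    simp only [pvLoopA, pvDecodeB]
    by_cases hlen : (data.length : Int) ≤ addr + offset
    · simp [hlen]
    · simp only [if_neg hlen]
      have ha : ∀ s : Int, addr + (offset + s) = addr + offset + s := by intro s; ring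
      cases hq : PySem.Dict.get? pvOpcodes (PySem.List.pyGetD data (addr + offset) 0) with
      | none =>
        have hr : PySem.List.pyRange 1 1 1 = [] := by decide
        simp [ih, ha, pvDecodeB_one, pvFmtB, hr, PySem.Chars.join_singleton,
          List.replicate, List.append_assoc]
      | some e =>
        obtain ⟨mnem, size⟩ := e
        rcases pvOpcodes_size hq with hs | hs | hs <;> subst hs
        · have hr : PySem.List.pyRange 1 1 1 = [] := by decide
          simp [ih, ha, pvDecodeB_one, pvFmtB, hr, PySem.Chars.join_singleton,
            List.replicate, List.append_assoc]
        · have hr : PySem.List.pyRange 1 2 1 = [1] := by decide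
          simp [ih, ha, pvDecodeB_one, pvFmtB, hr, pvZeroBor, PySem.Chars.join_cons_cons,
            PySem.Chars.join_singleton, List.replicate, List.append_assoc]
        · have hr : PySem.List.pyRange 1 3 1 = [1, 2] := by decide
          simp [ih, ha, pvDecodeB_one, pvFmtB, hr, pvZeroBor, PySem.Chars.join_cons_cons,
            PySem.Chars.join_singleton, List.replicate, List.append_assoc]

-- ===== VERDICT (by name: the statement is the Claim_ definition above) =====
theorem disasm_8051_spec : Claim_equal_disasm_8051 := by
  intro data addr count _ _
  unfold Spec_disasm_8051 disasm_8051 disasm_8051_alt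
  rw [pvLoop_eq data addr count.toNat 0 []]
  simp
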